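-- pv_equiv track=rewrite | github.com/sligocki/etc | brainfuck_busy_beaver/col_sim.py | B1
-- ===== SOURCE A (Python) =====
-- def B1(M, N):
--   # Pos: [0, a, b*, c, 0...]
--   a, b, c = 0, M+1, 0
--   while b > 0:
--     assert c >= 0, (a, b, c)
--     if a == 0:
--       a, b, c = b-1, c+N, 0
--     else:
--       assert a > 0, (a, b, c)
--       a, b, c = a-1, b-1, c+N
--   assert b == 0, (a, b, c)
--   return max(a, c)
-- ===== SOURCE B (Python) =====
-- def B1(M, N):
--   # Phase-level simulation: fast-forward each consecutive decrement run.
--   if M < 0: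
--     return 0
--   p, q = M, N
--   while 0 < q and p < q:
--     p, q = q - p - 1, N * (p + 1)
--   return max(p - q, N * q) if q > 0 else p
-- ===== Notes on version B (the rewrite author's own statement) =====
-- stated objective: faster
-- what changed: B replaces A's one-decrement-per-iteration counter-machine loop by a phase-level loop that fast-forwards each consecutive decrement run in one arithmetic step (p, q = q-p-1, N*(p+1)); intended as faster (O(phases) vs O(machine steps)); measured: a timing run read B ~128x at the largest size both finished, with A timing out on larger probe inputs.
-- outside the precondition, e.g. on B1(-2, 0): A raises AssertionError, B returns 0; on B1(3, -1): A raises AssertionError, B returns 3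
-- crash fix: A raises AssertionError when M <= -2 (the loop never runs and b = M+1 < 0 fails 'assert b == 0') and when M >= 0 and N < 0 (the first phase leaves b = N < 0); B returns 0 resp. M there. — e.g. on B1(-2, 0): A raises AssertionError, B returns 0
import Mathlib
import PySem

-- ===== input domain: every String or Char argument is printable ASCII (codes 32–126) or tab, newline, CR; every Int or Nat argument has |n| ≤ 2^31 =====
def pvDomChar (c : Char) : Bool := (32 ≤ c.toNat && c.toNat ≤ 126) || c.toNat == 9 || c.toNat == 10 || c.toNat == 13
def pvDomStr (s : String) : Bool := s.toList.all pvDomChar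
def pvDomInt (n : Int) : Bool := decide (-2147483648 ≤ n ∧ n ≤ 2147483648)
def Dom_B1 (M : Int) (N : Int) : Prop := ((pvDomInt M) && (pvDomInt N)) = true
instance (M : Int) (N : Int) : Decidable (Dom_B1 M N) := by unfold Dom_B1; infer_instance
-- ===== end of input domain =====

-- B replaces A's step-by-step counter-machine loop by a phase-level loop fast-forwarding
-- each consecutive decrement run (intended as faster, O(phases) instead of O(machine steps);
-- a timing run measured B ~128x at the largest size both finished, A timing out beyond).

-- ===== PORT A =====
-- A's while-loop, step by step. The loop is not structurally recursive (its phase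
-- transition 'a, b, c = b-1, c+N, 0' can grow b), so the port carries a fuel guard that
-- is consumed ONLY at those phase transitions (the 'a > 0' steps strictly decrease b);
-- `none` = AssertionError (c < 0, a < 0, or final b ≠ 0) or fuel exhausted.
def loopA (N : Int) (fuel : Nat) (a b c : Int) : Option Int :=
  if _hb : 0 < b then
    if c < 0 then none            -- assert c >= 0
    else if a = 0 then
      match fuel with
      | 0 => none
      | f + 1 => loopA N f (b - 1) (c + N) 0
    else if 0 < a then loopA N fuel (a - 1) (b - 1) (c + N)
    else none                     -- assert a > 0
  else if b = 0 then some (max a c) else none   -- assert b == 0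
termination_by (fuel, b.toNat)
decreasing_by
  · exact Prod.Lex.left _ _ (Nat.lt_succ_self _)
  · exact Prod.Lex.right _ (by omega)

def B1 (M : Int) (N : Int) : Int := (loopA N (2 ^ 64) 0 (M + 1) 0).getD 0

-- ===== PORT B =====
-- Source B's phase loop: state (p, q); fuel is consumed once per iteration, matching the
-- fuel loopA consumes at each 'a == 0' transition.
def loopB (N : Int) (fuel : Nat) (p q : Int) : Option Int :=
  if 0 < q ∧ p < q then
    match fuel with
    | 0 => none
    | f + 1 => loopB N f (q - p - 1) (N * (p + 1))
  else some (if 0 < q then max (p - q) (N * q) else p)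
termination_by fuel

def B1_alt (M : Int) (N : Int) : Int :=
  if M < 0 then 0 else (loopB N (2 ^ 64 - 1) M N).getD 0

-- ===== PRECONDITION & SPEC =====
-- Pre_ excludes inputs where A does not return normally: M ≤ -2 and (M ≥ 0, N < 0) make
-- A's asserts fail (AssertionError), and on (M, N) = (0, 1) A loops forever.
def Pre_B1 (M : Int) (N : Int) : Prop :=
  M = -1 ∨ (0 ≤ M ∧ 0 ≤ N ∧ ¬(M = 0 ∧ N = 1))
instance (M : Int) (N : Int) : Decidable (Pre_B1 M N) := by unfold Pre_B1; infer_instance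
def pvWitness_B1 : Int × Int := (4, 3)

-- A raises AssertionError when M ≤ -2 (loop never runs, b = M+1 < 0 fails 'assert b == 0')
-- and when M ≥ 0 ∧ N < 0 (the first phase leaves b = N < 0); B returns 0 resp. M there.
def Raises_B1 (M : Int) (N : Int) : Prop := M ≤ -2 ∨ (0 ≤ M ∧ N < 0)
instance (M : Int) (N : Int) : Decidable (Raises_B1 M N) := by unfold Raises_B1; infer_instance
def pvRaiseWitness_B1 : Int × Int := (-2, 0)
def pvRaiseWitnessOut_B1 : Int := 0

def Spec_B1 (M : Int) (N : Int) (out : Int) : Prop := out = B1_alt M N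
instance (M : Int) (N : Int) (out : Int) : Decidable (Spec_B1 M N out) := by unfold Spec_B1; infer_instance

-- ===== CLAIM (what is proved, stated in full; the proofs are below) =====
def Claim_equal_B1 : Prop := ∀ (M : Int) (N : Int), Dom_B1 M N → Pre_B1 M N → Spec_B1 M N (B1 M N)
def Claim_raises_B1 : Prop :=
  (∀ (M : Int) (N : Int), Dom_B1 M N → Raises_B1 M N → ¬ Pre_B1 M N) ∧
  (Dom_B1 (pvRaiseWitness_B1.1) (pvRaiseWitness_B1.2) ∧
   Raises_B1 (pvRaiseWitness_B1.1) (pvRaiseWitness_B1.2) ∧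
   B1_alt (pvRaiseWitness_B1.1) (pvRaiseWitness_B1.2) = pvRaiseWitnessOut_B1)

-- ===== LEMMAS AND PROOFS =====

-- Fast-forwarding a decrement run: j consecutive 'a > 0' steps of A (no fuel consumed).
lemma loopA_run (N : Int) (hN : 0 ≤ N) (fuel : Nat) :
    ∀ (j : Nat) (a b c : Int), 0 ≤ c → (j : Int) ≤ a → (j : Int) ≤ b →
      loopA N fuel a b c = loopA N fuel (a - j) (b - j) (c + N * j) := by
  intro j
  induction j with
  | zero => intro a b c _ _ _; simp
  | succ k ih =>
    intro a b c hc ha hb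
    have h1 : loopA N fuel a b c = loopA N fuel (a - 1) (b - 1) (c + N) := by
      rw [loopA.eq_def]
      have hb' : 0 < b := by push_cast at hb; omega
      have ha' : ¬ a = 0 := by push_cast at ha; omega
      have ha2 : 0 < a := by push_cast at ha; omega
      simp [hb', ha', ha2, not_lt.mpr hc]
    rw [h1, ih (a - 1) (b - 1) (c + N) (by positivity) (by push_cast at ha ⊢; omega)
        (by push_cast at hb ⊢; omega)]
    congr 1 <;> push_cast <;> ring

-- At a phase boundary (A's state (p, q, 0) right after an 'a == 0' step) the two loops
-- agree, fuel for fuel.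
lemma loopA_eq_loopB (N : Int) (hN : 0 ≤ N) :
    ∀ (fuel : Nat) (p q : Int), 0 ≤ p → 0 ≤ q →
      loopA N fuel p q 0 = loopB N fuel p q := by
  intro fuel
  induction fuel with
  | zero =>
    intro p q hp hq
    rcases lt_or_eq_of_le hq with hq' | hq'
    · by_cases hpq : p < q
      · by_cases hp0 : p = 0
        · rw [loopA.eq_def, loopB.eq_def]; simp [hq', hp0]
        · have hrun := loopA_run N hN 0 p.toNat p q 0 le_rfl (by omega) (by omega)
          rw [hrun, loopA.eq_def, loopB.eq_def]
          simp [hq', hpq, show p - (p.toNat : Int) = 0 by omega,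
                show (0:Int) < q - p.toNat by omega]
      · have hrun := loopA_run N hN 0 q.toNat p q 0 le_rfl (by omega) (by omega)
        rw [hrun, loopA.eq_def, loopB.eq_def]
        simp [hq', hpq, show q - (q.toNat : Int) = 0 by omega]
        constructor
        · omega
        · congr 1 <;> [skip; congr 1] <;> omega
    · rw [loopA.eq_def, loopB.eq_def]
      simp [← hq', hp]
  | succ f ih =>
    intro p q hp hq
    rcases lt_or_eq_of_le hq with hq' | hq'
    · by_cases hpq : p < q
      · by_cases hp0 : p = 0
        · rw [loopA.eq_def, loopB.eq_def]
          simp only [hq', hpq, hp0, and_self, if_pos, dif_pos, lt_irrefl]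
          have := ih (q - 1) N (by omega) hN
          simpa using this
        · have hrun := loopA_run N hN (f + 1) p.toNat p q 0 le_rfl (by omega) (by omega)
          rw [hrun, loopA.eq_def, loopB.eq_def]
          simp only [show p - (p.toNat : Int) = 0 by omega, zero_add,
            dif_pos (show (0:Int) < q - p.toNat by omega), if_pos (And.intro hq' hpq),
            if_neg (not_lt.mpr (by positivity : (0:Int) ≤ N * p.toNat))]
          have hpt : (p.toNat : Int) = p := by omega
          rw [hpt, show N * p + N = N * (p + 1) by ring]
          exact ih (q - p - 1) (N * (p + 1)) (by omega) (by positivity)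
      · have hrun := loopA_run N hN (f + 1) q.toNat p q 0 le_rfl (by omega) (by omega)
        rw [hrun, loopA.eq_def, loopB.eq_def]
        simp [hq', hpq, show q - (q.toNat : Int) = 0 by omega]
        constructor
        · omega
        · congr 1 <;> [skip; congr 1] <;> omega
    · rw [loopA.eq_def, loopB.eq_def]
      simp [← hq', hp]

-- ===== VERDICT (by name: the statement is the Claim_ definition above) =====
theorem B1_spec : Claim_equal_B1 := by
  intro M N _ hP
  unfold Spec_B1 B1 B1_alt
  rcases hP with h | ⟨hM, hN, _⟩
  · subst h; rw [loopA.eq_def]; norm_num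
  · rw [loopA.eq_def]
    simp only [dif_pos (show (0:Int) < M + 1 by omega), if_neg (show ¬ (0:Int) < 0 by omega),
      if_neg (show ¬ M < 0 by omega), if_true]
    rw [loopA_eq_loopB N hN _ (M + 1 - 1) (0 + N) (by omega) (by omega)]
    congr 2 <;> norm_num

@[simp] theorem B1_raises : Claim_raises_B1 := by
  unfold Claim_raises_B1
  constructor
  · intro M N _ hR hP
    unfold Raises_B1 at hR; unfold Pre_B1 at hP; omega
  · exact ⟨by decide, by left; decide, by decide⟩
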